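-- pv_equiv track=rewrite | github.com/tushar994/automata | Q1/string_processing.py | create_parts
-- ===== SOURCE A (Python) =====
-- def create_parts(str1):
--     components = []
--     bracket_var = 0
--     current_component = ""
--     current_index = 0
--     index = 0
--
--     while index<len(str1):
--         current_letter = str1[index]
--         current_component += current_letter
--         if(current_letter=='('):
--             bracket_var+=1
--         elif(current_letter==')'):
--             bracket_var-=1
--
--         if(bracket_var==0):
--             if(index<len(str1)-1 and str1[index+1]=='*'):
--                 index+=1
--                 current_component+='*'
--             components.append([current_component, current_index])
--             current_index = index+1
--             current_component = ""
--         index+=1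
--
--     return components
-- ===== SOURCE B (Python) =====
-- def create_parts(str1):
--     # first pass: record bracket-balanced spans; second pass: slice them out
--     spans = []
--     depth = 0
--     start = 0
--     i = 0
--     n = len(str1)
--     while i < n:
--         c = str1[i]
--         if c == '(':
--             depth += 1
--         elif c == ')':
--             depth -= 1
--         if depth == 0:
--             end = i + 1
--             if end < n and str1[end] == '*':
--                 end += 1
--             spans.append((start, end))
--             start = end
--             i = end
--         else:
--             i += 1
--     return [[str1[a:b], a] for a, b in spans]
-- ===== Notes on version B (the rewrite author's own statement) =====
-- stated objective: alternative
-- what changed: B no longer accumulates each component character by character; a first pass records only (start, end) index spans where the bracket depth returns to 0 (extending by one for a trailing '*'), and a second pass slices those spans out of the string.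
import Mathlib
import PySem

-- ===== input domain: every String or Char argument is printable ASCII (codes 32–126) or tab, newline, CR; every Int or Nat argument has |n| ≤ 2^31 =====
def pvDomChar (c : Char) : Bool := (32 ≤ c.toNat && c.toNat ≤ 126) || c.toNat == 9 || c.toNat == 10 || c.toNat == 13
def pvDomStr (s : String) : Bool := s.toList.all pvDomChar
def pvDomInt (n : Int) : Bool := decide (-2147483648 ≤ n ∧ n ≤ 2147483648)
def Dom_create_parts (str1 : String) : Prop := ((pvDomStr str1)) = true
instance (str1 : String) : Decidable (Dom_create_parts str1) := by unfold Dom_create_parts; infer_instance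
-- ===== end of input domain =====

-- B replaces A's char-by-char accumulation of each component by a span-recording pass
-- followed by slicing (different decomposition; objective: alternative, no speed claim).

-- ===== PORT A =====
-- A's while loop: index, bracket counter, current component built char by char, current_index.
def createPartsLoopA (cs : List Char) (index : Nat) (bracket : Int)
    (cur : List Char) (curIdx : Nat) : List (String × Int) :=
  if h : index < cs.length then
    let c := cs[index]
    let cur' := cur ++ [c]
    let bracket' := if c = '(' then bracket + 1 else if c = ')' then bracket - 1 else bracket
    if bracket' = 0 then
      if index < cs.length - 1 ∧ cs.getD (index + 1) ' ' = '*' then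
        (String.mk (cur' ++ ['*']), (curIdx : Int)) ::
          createPartsLoopA cs (index + 2) bracket' [] (index + 2)
      else
        (String.mk cur', (curIdx : Int)) ::
          createPartsLoopA cs (index + 1) bracket' [] (index + 1)
    else
      createPartsLoopA cs (index + 1) bracket' cur' curIdx
  else []
termination_by cs.length - index
decreasing_by all_goals omega

def create_parts (str1 : String) : List (String × Int) :=
  createPartsLoopA str1.toList 0 0 [] 0

-- ===== PORT B =====
-- first pass: record (start, end) spans where the bracket depth returns to 0
def createPartsSpans (cs : List Char) (i : Nat) (depth : Int) (start : Nat) : List (Nat × Nat) :=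
  if h : i < cs.length then
    let c := cs[i]
    let depth' := if c = '(' then depth + 1 else if c = ')' then depth - 1 else depth
    if depth' = 0 then
      let e := if i + 1 < cs.length ∧ cs.getD (i + 1) ' ' = '*' then i + 2 else i + 1
      (start, e) :: createPartsSpans cs e depth' e
    else
      createPartsSpans cs (i + 1) depth' start
  else []
termination_by cs.length - i
decreasing_by all_goals first | omega | (split <;> omega)

-- second pass: str1[a:b] is an in-range nonnegative slice, i.e. drop a, take (b - a)
def create_parts_alt (str1 : String) : List (String × Int) :=
  (createPartsSpans str1.toList 0 0 0).map
    (fun p => (String.mk (((str1.toList).drop p.1).take (p.2 - p.1)), (p.1 : Int)))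

-- ===== PRECONDITION & SPEC =====
def Spec_create_parts (str1 : String) (out : List (String × Int)) : Prop := out = create_parts_alt str1
instance (str1 : String) (out : List (String × Int)) : Decidable (Spec_create_parts str1 out) := by unfold Spec_create_parts; infer_instance

-- ===== CLAIM (what is proved, stated in full; the proofs are below) =====
def Claim_equal_create_parts : Prop := ∀ (str1 : String), Dom_create_parts str1 → Spec_create_parts str1 (create_parts str1)

-- ===== LEMMAS AND PROOFS =====

lemma take_snoc (cs : List Char) (a k i : Nat) (hi : i < cs.length) (e : a + k = i) :
    (cs.drop a).take k ++ [cs[i]] = (cs.drop a).take (k + 1) := by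
  subst e
  have h1 : k < (cs.drop a).length := by simp; omega
  have h2 : cs[a + k] = (cs.drop a)[k] := by simp [List.getElem_drop]
  rw [h2, ← List.concat_eq_append]
  exact List.take_concat_get h1

lemma loopA_eq_spans (cs : List Char) :
    ∀ fuel index bracket curIdx, cs.length - index ≤ fuel → curIdx ≤ index →
    createPartsLoopA cs index bracket ((cs.drop curIdx).take (index - curIdx)) curIdx
      = (createPartsSpans cs index bracket curIdx).map
          (fun p => (String.mk ((cs.drop p.1).take (p.2 - p.1)), (p.1 : Int))) := by
  intro fuel
  induction fuel with
  | zero =>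
      intro index bracket curIdx hf _
      have h : ¬ index < cs.length := by omega
      rw [createPartsLoopA, createPartsSpans]
      simp [h]
  | succ n ih =>
      intro index bracket curIdx hf hle
      rw [createPartsLoopA, createPartsSpans]
      by_cases h : index < cs.length
      · simp only [dif_pos h]
        have hsnoc : (cs.drop curIdx).take (index - curIdx) ++ [cs[index]]
            = (cs.drop curIdx).take (index - curIdx + 1) :=
          take_snoc cs curIdx (index - curIdx) index h (by omega)
        set bracket' := if cs[index] = '(' then bracket + 1 else
          if cs[index] = ')' then bracket - 1 else bracket with hb
        by_cases hz : bracket' = 0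
        · simp only [hsnoc, hz, if_true]
          by_cases hstar : index < cs.length - 1 ∧ cs.getD (index + 1) ' ' = '*'
          · have hstar' : index + 1 < cs.length ∧ cs.getD (index + 1) ' ' = '*' := ⟨by omega, hstar.2⟩
            simp only [if_pos hstar, if_pos hstar', List.map_cons]
            have hget : cs[index + 1]'(by omega) = '*' := by
              have : cs.getD (index + 1) ' ' = cs[index + 1]'(by omega) := by
                simp [List.getD_eq_getElem?_getD, List.getElem?_eq_getElem (by omega : index + 1 < cs.length)]
              rw [← this]; exact hstar.2
            have h2 : (cs.drop curIdx).take (index - curIdx + 1) ++ ['*']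
                = (cs.drop curIdx).take (index - curIdx + 2) := by
              have := take_snoc cs curIdx (index - curIdx + 1) (index + 1) (by omega) (by omega)
              rw [hget] at this; exact this
            have hrec := ih (index + 2) bracket' (index + 2) (by omega) (le_refl _)
            simp only [Nat.sub_self, List.take_zero] at hrec
            rw [hz] at hrec
            rw [h2, hrec]
            have e1 : index - curIdx + 2 = index + 2 - curIdx := by omega
            rw [e1]
          · have hstar' : ¬ (index + 1 < cs.length ∧ cs.getD (index + 1) ' ' = '*') := by
              intro hc; exact hstar ⟨by omega, hc.2⟩
            simp only [if_neg hstar, if_neg hstar', List.map_cons]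
            have hrec := ih (index + 1) bracket' (index + 1) (by omega) (le_refl _)
            simp only [Nat.sub_self, List.take_zero] at hrec
            rw [hz] at hrec
            rw [hrec]
            have e1 : index - curIdx + 1 = index + 1 - curIdx := by omega
            rw [e1]
        · simp only [hsnoc, if_neg hz]
          have e : index - curIdx + 1 = index + 1 - curIdx := by omega
          rw [e]
          exact ih (index + 1) bracket' curIdx (by omega) (by omega)
      · simp [h]

-- ===== VERDICT (by name: the statement is the Claim_ definition above) =====
theorem create_parts_spec : Claim_equal_create_parts := by
  intro str1 _
  unfold Spec_create_parts create_parts create_parts_alt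
  have := loopA_eq_spans str1.toList str1.toList.length 0 0 0 (by omega) (by omega)
  simpa using this
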